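-- pv_equiv track=rewrite | github.com/resfzdfdz/SM2python | ENTF.py | get_standard_factorize
-- ===== SOURCE A (Python) =====
-- def get_standard_factorize(s):
--     diff_factors = sorted(list(set(s)))
--     diff_power = []
--
--     for per in diff_factors:
--         c = 0
--         for item in s:
--             if (per == item):
--                 c += 1
--         diff_power.append(c)
--
--     return diff_factors, diff_power
-- ===== SOURCE B (Python) =====
-- def get_standard_factorize(s):
--     diff_factors = []
--     diff_power = []
--     prev = None
--     run = 0
--     for x in sorted(s):
--         if run and x == prev:
--             run += 1
--         else:
--             if run:
--                 diff_factors.append(prev)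
--                 diff_power.append(run)
--             prev = x
--             run = 1
--     if run:
--         diff_factors.append(prev)
--         diff_power.append(run)
--     return diff_factors, diff_power
-- ===== Notes on version B (the rewrite author's own statement) =====
-- stated objective: faster
-- what changed: Replaces A's set-build plus one full rescan of s per distinct value by a single sort followed by one linear run-grouping sweep that emits each distinct value and its run length.
import Mathlib
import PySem

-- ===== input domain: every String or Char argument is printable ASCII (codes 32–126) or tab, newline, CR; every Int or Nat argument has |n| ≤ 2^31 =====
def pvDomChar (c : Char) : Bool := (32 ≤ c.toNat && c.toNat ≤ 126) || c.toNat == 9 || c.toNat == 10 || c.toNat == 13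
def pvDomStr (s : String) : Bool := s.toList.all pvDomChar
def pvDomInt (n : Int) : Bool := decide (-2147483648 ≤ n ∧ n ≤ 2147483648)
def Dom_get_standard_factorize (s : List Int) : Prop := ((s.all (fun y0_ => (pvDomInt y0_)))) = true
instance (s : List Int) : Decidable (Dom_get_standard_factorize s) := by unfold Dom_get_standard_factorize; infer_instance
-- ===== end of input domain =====

-- B replaces A's set-build plus one full rescan of s per distinct value by one sort of s
-- followed by a single run-grouping sweep (objective: faster on duplicate-light inputs).

-- ===== PORT A =====
def get_standard_factorize (s : List Int) : List Int × List Int :=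
  let diff_factors := PySem.List.sorted (PySem.Set.ofList s) (fun x => x) false
  let diff_power := diff_factors.foldl
    (fun acc per => acc ++ [s.foldl (fun c item => if per == item then c + 1 else c) (0 : Int)])
    ([] : List Int)
  (diff_factors, diff_power)

-- ===== PORT B =====
-- state = (diff_factors, diff_power, prev, run); Python's 'prev = None' is 'none';
-- Python reads prev only when run ≠ 0 (then prev is set), so 'prev.getD 0' is exact there.
def gsfStep (st : List Int × List Int × Option Int × Int) (x : Int) :
    List Int × List Int × Option Int × Int :=
  let (fs, ps, prev, run) := st
  if run ≠ 0 ∧ prev = some x then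
    (fs, ps, prev, run + 1)
  else
    ((if run ≠ 0 then fs ++ [prev.getD 0] else fs),
     (if run ≠ 0 then ps ++ [run] else ps), some x, 1)

-- the trailing 'if run: append' after the loop
def gsfFinish (st : List Int × List Int × Option Int × Int) : List Int × List Int :=
  let (fs, ps, prev, run) := st
  if run ≠ 0 then (fs ++ [prev.getD 0], ps ++ [run]) else (fs, ps)

def get_standard_factorize_alt (s : List Int) : List Int × List Int :=
  gsfFinish ((PySem.List.sorted s (fun x => x) false).foldl gsfStep ([], [], none, 0))

-- ===== PRECONDITION & SPEC =====
def Spec_get_standard_factorize (s : List Int) (out : List Int × List Int) : Prop := out = get_standard_factorize_alt s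
instance (s : List Int) (out : List Int × List Int) : Decidable (Spec_get_standard_factorize s out) := by unfold Spec_get_standard_factorize; infer_instance

-- ===== CLAIM (what is proved, stated in full; the proofs are below) =====
def Claim_equal_get_standard_factorize : Prop := ∀ (s : List Int), Dom_get_standard_factorize s → Spec_get_standard_factorize s (get_standard_factorize s)

-- ===== LEMMAS AND PROOFS =====

-- run-length encoding of adjacent equal runs (proof-side characterisation of B's sweep)
def rle : List Int → List Int × List Int
  | [] => ([], [])
  | x :: t =>
    let r := rle (t.dropWhile (fun y => y == x))
    (x :: r.1, (((t.takeWhile (fun y => y == x)).length : Int) + 1) :: r.2)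
termination_by l => l.length
decreasing_by
  simp only [List.length_cons]
  have := List.length_dropWhile_le (fun y => y == x) t
  omega

theorem gsf_foldl_rle (l : List Int) : ∀ (fs ps : List Int) (p : Int) (r : Int), 0 < r →
    gsfFinish (l.foldl gsfStep (fs, ps, some p, r)) =
      (fs ++ p :: (rle (l.dropWhile (fun y => y == p))).1,
       ps ++ (r + ((l.takeWhile (fun y => y == p)).length : Int)) ::
         (rle (l.dropWhile (fun y => y == p))).2) := by
  induction l with
  | nil =>
    intro fs ps p r hr
    have hr' : r ≠ 0 := by omega
    simp [gsfFinish, hr', rle]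
  | cons x t ih =>
    intro fs ps p r hr
    have hr' : r ≠ 0 := by omega
    by_cases hpx : p = x
    · subst hpx
      have hstep : gsfStep (fs, ps, some p, r) p = (fs, ps, some p, r + 1) := by
        simp [gsfStep, hr']
      have hr1 : 0 < r + 1 := by omega
      simp only [List.foldl_cons, hstep]
      rw [ih fs ps p (r + 1) hr1]
      simp only [List.takeWhile_cons, List.dropWhile_cons, beq_self_eq_true, if_true,
        List.length_cons, Prod.mk.injEq]
      refine ⟨trivial, ?_⟩
      have harith : ((r + 1) + ((t.takeWhile (fun y => y == p)).length : Int)) =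
          (r + (((t.takeWhile (fun y => y == p)).length : Int) + 1)) := by ring
      rw [harith]
      push_cast
      ring_nf
    · have hbe : ¬ ((x == p) = true) := by
        simp only [beq_iff_eq]; exact fun h => hpx h.symm
      have hstep : gsfStep (fs, ps, some p, r) x = (fs ++ [p], ps ++ [r], some x, 1) := by
        simp [gsfStep, hr', hpx, Option.getD]
      simp only [List.foldl_cons, hstep]
      rw [ih (fs ++ [p]) (ps ++ [r]) x 1 one_pos]
      have hdw : (x :: t).dropWhile (fun y => y == p) = x :: t := by
        simp [List.dropWhile, hbe]
      have htw : (x :: t).takeWhile (fun y => y == p) = [] := by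
        simp [List.takeWhile, hbe]
      rw [hdw, htw]
      rw [show rle (x :: t) = (x :: (rle (t.dropWhile (fun y => y == x))).1,
        (((t.takeWhile (fun y => y == x)).length : Int) + 1) :: (rle (t.dropWhile (fun y => y == x))).2)
        from by rw [rle]]
      simp only [List.length_nil, Nat.cast_zero, add_zero,
        List.append_assoc, List.singleton_append, Prod.mk.injEq]
      exact ⟨trivial, by rw [add_comm]⟩

theorem alt_eq_rle (s : List Int) :
    get_standard_factorize_alt s = rle (PySem.List.sorted s (fun x => x) false) := by
  unfold get_standard_factorize_alt
  cases h : PySem.List.sorted s (fun x => x) false with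
  | nil => simp [gsfFinish, rle]
  | cons x t =>
    have hstep : gsfStep ([], [], none, 0) x = ([], [], some x, 1) := by
      simp [gsfStep]
    simp only [List.foldl_cons, hstep]
    rw [gsf_foldl_rle t [] [] x 1 one_pos]
    rw [show rle (x :: t) = (x :: (rle (t.dropWhile (fun y => y == x))).1,
      (((t.takeWhile (fun y => y == x)).length : Int) + 1) :: (rle (t.dropWhile (fun y => y == x))).2)
      from by rw [rle]]
    simp only [List.nil_append, Prod.mk.injEq]
    exact ⟨trivial, by rw [add_comm]⟩

theorem mem_rle_fst (l : List Int) : ∀ y, y ∈ (rle l).1 ↔ y ∈ l := by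
  induction l using rle.induct with
  | case1 => simp [rle]
  | case2 x t ih =>
    intro y
    rw [rle]
    simp only [List.mem_cons]
    rw [ih]
    constructor
    · rintro (rfl | h)
      · exact Or.inl rfl
      · exact Or.inr (List.dropWhile_sublist _ |>.mem h)
    · rintro (rfl | h)
      · exact Or.inl rfl
      · have hsplit : t.takeWhile (fun y => y == x) ++ t.dropWhile (fun y => y == x) = t :=
          List.takeWhile_append_dropWhile
        rcases List.mem_append.mp (by rw [hsplit]; exact h) with h1 | h2
        · left
          have := List.mem_takeWhile_imp h1
          simpa using this
        · exact Or.inr h2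

-- on a sorted list, everything after the leading run of x is strictly above x
theorem dropWhile_lt (x : Int) (t : List Int) (hp : (x :: t).Pairwise (· ≤ ·)) :
    ∀ y ∈ t.dropWhile (fun y => y == x), x < y := by
  have hle : ∀ y ∈ t, x ≤ y := (List.pairwise_cons.mp hp).1
  have hpt : t.Pairwise (· ≤ ·) := (List.pairwise_cons.mp hp).2
  cases hd : t.dropWhile (fun y => y == x) with
  | nil => intro y hy; simp at hy
  | cons a u =>
    have hane : ¬ (a == x) = true := by
      have h := List.head?_dropWhile_not (p := fun y => y == x) (l := t)
      rw [hd] at h; simpa using h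
    have hane' : a ≠ x := by simpa using hane
    have hat : a ∈ t := (List.dropWhile_sublist _).mem (by rw [hd]; exact List.mem_cons_self)
    have hxa : x < a := lt_of_le_of_ne (hle a hat) (Ne.symm hane')
    have hdw : (a :: u).Pairwise (· ≤ ·) := hd ▸ hpt.sublist (List.dropWhile_sublist _)
    intro y hy
    rcases List.mem_cons.mp hy with rfl | hyu
    · exact hxa
    · exact lt_of_lt_of_le hxa ((List.pairwise_cons.mp hdw).1 y hyu)

theorem rle_sorted (l : List Int) : l.Pairwise (· ≤ ·) →
    (rle l).2 = (rle l).1.map (fun v => (l.count v : Int)) ∧ (rle l).1.Pairwise (· < ·) := by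
  induction l using rle.induct with
  | case1 => intro _; simp [rle]
  | case2 x t ih =>
    intro hp
    have hlt : ∀ y ∈ t.dropWhile (fun y => y == x), x < y := dropWhile_lt x t hp
    have hpt : t.Pairwise (· ≤ ·) := (List.pairwise_cons.mp hp).2
    have hpdw : (t.dropWhile (fun y => y == x)).Pairwise (· ≤ ·) :=
      hpt.sublist (List.dropWhile_sublist _)
    obtain ⟨ih2, ih1⟩ := ih hpdw
    have hxdw : x ∉ t.dropWhile (fun y => y == x) := fun h => lt_irrefl x (hlt x h)
    have htw : ∀ y ∈ t.takeWhile (fun y => y == x), y = x := by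
      intro y hy
      have := List.mem_takeWhile_imp hy
      simpa using this
    have hsplit : t = t.takeWhile (fun y => y == x) ++ t.dropWhile (fun y => y == x) :=
      (List.takeWhile_append_dropWhile).symm
    constructor
    · rw [rle]
      simp only [List.map_cons, List.cons.injEq]
      refine ⟨?_, ?_⟩
      · -- head: run length + 1 = count of x in x :: t
        have hcx : (x :: t).count x = (t.takeWhile (fun y => y == x)).length + 1 := by
          rw [List.count_cons_self]
          conv_lhs => rw [hsplit]
          rw [List.count_append]
          have h1 : (t.takeWhile (fun y => y == x)).count x =
              (t.takeWhile (fun y => y == x)).length :=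
            List.count_eq_length.mpr (fun b hb => (htw b hb).symm)
          have h2 : (t.dropWhile (fun y => y == x)).count x = 0 :=
            List.count_eq_zero.mpr hxdw
          omega
        rw [hcx]; push_cast; ring
      · -- tail: counts in x :: t of the distinct values of the strict suffix
        rw [ih2]
        apply List.map_congr_left
        intro v hv
        have hvdw : v ∈ t.dropWhile (fun y => y == x) := (mem_rle_fst _ v).mp hv
        have hxv : x < v := hlt v hvdw
        have hcv : (x :: t).count v = (t.dropWhile (fun y => y == x)).count v := by
          rw [List.count_cons_of_ne (ne_of_lt hxv)]
          conv_lhs => rw [hsplit]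
          rw [List.count_append]
          have : (t.takeWhile (fun y => y == x)).count v = 0 :=
            List.count_eq_zero.mpr (fun h => absurd (htw v h) ((ne_of_lt hxv).symm))
          omega
        rw [hcv]
    · rw [rle]
      refine List.pairwise_cons.mpr ⟨?_, ih1⟩
      intro y hy
      exact hlt y ((mem_rle_fst _ y).mp hy)

-- A's inner loop is a count
theorem inner_count (per : Int) (s : List Int) :
    s.foldl (fun c item => if per == item then c + 1 else c) (0 : Int) = (s.count per : Int) := by
  have h : (fun (c : Int) (item : Int) => if per == item then c + 1 else c) =
      (fun (c : Int) (item : Int) => if item == per then c + 1 else c) := by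
    funext c item
    by_cases hpi : per = item
    · subst hpi; rfl
    · have h1 : (per == item) = false := by simpa using hpi
      have h2 : (item == per) = false := by simpa using (Ne.symm hpi)
      rw [h1, h2]
  rw [h, PySem.List.foldl_beq_add_one]
  simp

theorem get_standard_factorize_spec : Claim_equal_get_standard_factorize := by
  intro s _
  unfold Spec_get_standard_factorize
  set l := PySem.List.sorted s (fun x => x) false with hl
  have hpl : l.Pairwise (· ≤ ·) := by
    simpa using PySem.List.sorted_pairwise (xs := s) (key := fun x => x)
  obtain ⟨h2, h1⟩ := rle_sorted l hpl
  have hperm : l.Perm s := PySem.List.sorted_perm s (fun x => x) false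
  have hd : PySem.List.sorted (PySem.Set.ofList s) (fun x => x) false = (rle l).1 := by
    apply PySem.List.sorted_eq_of_perm_of_pairwise_lt
    · rw [List.perm_ext_iff_of_nodup (h1.imp (fun h => ne_of_lt h)) (PySem.Set.nodup_ofList s)]
      intro a
      rw [mem_rle_fst, PySem.Set.mem_ofList, hl, PySem.List.mem_sorted]
    · simpa using h1
  rw [alt_eq_rle, ← hl]
  unfold get_standard_factorize
  simp only [PySem.List.foldl_append_singleton_eq_map, List.nil_append]
  rw [hd]
  refine Prod.ext rfl ?_

  rw [h2]
  apply List.map_congr_left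
  intro v _
  rw [inner_count, hperm.count_eq]
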